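-- pv_equiv track=rewrite | github.com/carlyn-thomsen/csce4201 | maincode.py | bestChoiceSim
-- ===== SOURCE A (Python) =====
-- def bestChoiceSim(theChoice, boxes2):
--     if len(theChoice) == 4:
--         counter1 = 0
--         counter2 = 0
--         counter3 = 0
--         counter4 = 0
--         for key in boxes2:
--             myList = boxes2[key]
--             if myList[0].__contains__(theChoice[0]):
--                 counter1 += 1
--             elif myList[0].__contains__(theChoice[1]):
--                 counter2 += 1
--             elif myList[0].__contains__(theChoice[2]):
--                 counter3 += 1
--             elif myList[0].__contains__(theChoice[3]):
--                 counter4 += 1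
--         theBest = min(counter1, counter2, counter3, counter4)
--         if theBest == counter1:
--             return theChoice[0]
--         elif theBest == counter2:
--             return theChoice[1]
--         elif theBest == counter3:
--             return theChoice[2]
--         else:
--             return theChoice[3]
--     elif len(theChoice) == 3:
--         counter1 = 0
--         counter2 = 0
--         counter3 = 0
--         for key in boxes2:
--             myList = boxes2[key]
--             if myList[0].__contains__(theChoice[0]):
--                 counter1 += 1
--             elif myList[0].__contains__(theChoice[1]):
--                 counter2 += 1
--             elif myList[0].__contains__(theChoice[2]):
--                 counter3 += 1
--         theBest = min(counter1, counter2, counter3)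
--         if theBest == counter1:
--             return theChoice[0]
--         elif theBest == counter2:
--             return theChoice[1]
--         else:
--             return theChoice[2]
--     else:
--         counter1 = 0
--         counter2 = 0
--         for key in boxes2:
--             myList = boxes2[key]
--             if myList[0].__contains__(theChoice[0]):
--                 counter1 += 1
--             elif myList[0].__contains__(theChoice[1]):
--                 counter2 += 1
--         theBest = min(counter1, counter2)
--         if theBest == counter1:
--             return theChoice[0]
--         else:
--             return theChoice[1]
-- ===== SOURCE B (Python) =====
-- def bestChoiceSim(theChoice, boxes2):
--     n = 4 if len(theChoice) == 4 else 3 if len(theChoice) == 3 else 2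
--
--     def hits(i):
--         # boxes credited to choice i under first-match-wins: choice i is in the
--         # box and no earlier choice is
--         return sum(1 for key in boxes2
--                    if theChoice[i] in boxes2[key][0]
--                    and not any(theChoice[j] in boxes2[key][0] for j in range(i)))
--
--     return theChoice[min(range(n), key=hits)]
-- ===== Notes on version B (the rewrite author's own statement) =====
-- stated objective: simpler
-- what changed: Instead of one pass that maintains counters (A's branch-per-length elif chains), B makes one staged counting pass per candidate (hits(i) counts boxes where choice i is the first match) and selects directly with min(range(n), key=hits), whose first-minimum rule gives the earliest-index tie-break; no counter state or counts list is kept at all.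
-- outside the precondition, e.g. on bestChoiceSim(['a'], {}): A returns 'a', B returns 'a'
import Mathlib
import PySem

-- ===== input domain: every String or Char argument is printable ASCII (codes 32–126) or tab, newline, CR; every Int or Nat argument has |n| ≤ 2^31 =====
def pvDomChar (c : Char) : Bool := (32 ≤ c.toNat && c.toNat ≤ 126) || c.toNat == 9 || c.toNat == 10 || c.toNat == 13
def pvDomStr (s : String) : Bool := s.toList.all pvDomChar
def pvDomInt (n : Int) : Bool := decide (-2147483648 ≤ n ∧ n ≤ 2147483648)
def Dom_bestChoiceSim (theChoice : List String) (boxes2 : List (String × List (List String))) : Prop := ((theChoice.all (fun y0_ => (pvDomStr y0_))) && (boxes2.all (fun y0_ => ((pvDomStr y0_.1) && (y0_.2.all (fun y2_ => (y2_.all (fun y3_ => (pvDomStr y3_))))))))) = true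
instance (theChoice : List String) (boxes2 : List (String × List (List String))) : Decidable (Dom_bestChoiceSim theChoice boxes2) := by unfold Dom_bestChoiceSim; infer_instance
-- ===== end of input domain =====

-- B replaces A's single counter-maintaining pass (three duplicated branch/elif chains) by one
-- staged counting pass per candidate (hits i = boxes whose first matching choice is i) and a
-- direct min-by-key selection; objective: simpler.  Return value only; no argument is mutated.

-- ===== PORT A =====
-- theChoice[i] (in range under the branch's length test / Pre_; default never reached there)
def getS (xs : List String) (i : Int) : String := (PySem.List.pyGet? xs i).getD ""
-- myList[0] (nonempty under Pre_)
def box0 (myList : List (List String)) : List String := (PySem.List.pyGet? myList 0).getD []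
-- 'for key in boxes2: myList = boxes2[key]' visits exactly the dict's (key, value) pairs in order
def stepA4 (tC : List String) (c : Int × Int × Int × Int) (kv : String × List (List String)) : Int × Int × Int × Int :=
  let box := box0 kv.2
  if box.contains (getS tC 0) then (c.1 + 1, c.2.1, c.2.2.1, c.2.2.2)
  else if box.contains (getS tC 1) then (c.1, c.2.1 + 1, c.2.2.1, c.2.2.2)
  else if box.contains (getS tC 2) then (c.1, c.2.1, c.2.2.1 + 1, c.2.2.2)
  else if box.contains (getS tC 3) then (c.1, c.2.1, c.2.2.1, c.2.2.2 + 1)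
  else c
def stepA3 (tC : List String) (c : Int × Int × Int) (kv : String × List (List String)) : Int × Int × Int :=
  let box := box0 kv.2
  if box.contains (getS tC 0) then (c.1 + 1, c.2.1, c.2.2)
  else if box.contains (getS tC 1) then (c.1, c.2.1 + 1, c.2.2)
  else if box.contains (getS tC 2) then (c.1, c.2.1, c.2.2 + 1)
  else c
def stepA2 (tC : List String) (c : Int × Int) (kv : String × List (List String)) : Int × Int :=
  let box := box0 kv.2
  if box.contains (getS tC 0) then (c.1 + 1, c.2)
  else if box.contains (getS tC 1) then (c.1, c.2 + 1)
  else c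

def bestChoiceSim (theChoice : List String) (boxes2 : List (String × List (List String))) : String :=
  if theChoice.length = 4 then
    let c := boxes2.foldl (stepA4 theChoice) (0, 0, 0, 0)
    let theBest := min (min (min c.1 c.2.1) c.2.2.1) c.2.2.2
    if theBest = c.1 then getS theChoice 0
    else if theBest = c.2.1 then getS theChoice 1
    else if theBest = c.2.2.1 then getS theChoice 2
    else getS theChoice 3
  else if theChoice.length = 3 then
    let c := boxes2.foldl (stepA3 theChoice) (0, 0, 0)
    let theBest := min (min c.1 c.2.1) c.2.2
    if theBest = c.1 then getS theChoice 0
    else if theBest = c.2.1 then getS theChoice 1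
    else getS theChoice 2
  else
    let c := boxes2.foldl (stepA2 theChoice) (0, 0)
    let theBest := min c.1 c.2
    if theBest = c.1 then getS theChoice 0
    else getS theChoice 1

-- ===== PORT B =====
-- 'any(theChoice[j] in boxes2[key][0] for j in range(i))'
def anyEarlier (tC box : List String) (i : Nat) : Bool :=
  (List.range i).any (fun j => box.contains (getS tC (j : Int)))
-- 'hits(i) = sum(1 for key in boxes2 if theChoice[i] in boxes2[key][0] and not any(...))'
def hits (tC : List String) (bs : List (String × List (List String))) (i : Nat) : Int :=
  bs.foldl (fun acc kv =>
    if (box0 kv.2).contains (getS tC (i : Int)) && !(anyEarlier tC (box0 kv.2) i)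
    then acc + 1 else acc) 0

def bestChoiceSim_alt (theChoice : List String) (boxes2 : List (String × List (List String))) : String :=
  let n : Nat := if theChoice.length = 4 then 4 else if theChoice.length = 3 then 3 else 2
  -- min(range(n), key=hits): first index with minimal key
  let bestI := (PySem.List.min? (List.range n) (fun i => hits theChoice boxes2 i)).getD 0
  getS theChoice (bestI : Int)

-- ===== PRECONDITION & SPEC =====
-- Pre_ excludes theChoice of length < 2 (the elif chains / final return then index past the end:
-- IndexError on all but degenerate inputs) and boxes whose value list is empty (myList[0] raises).
def Pre_bestChoiceSim (theChoice : List String) (boxes2 : List (String × List (List String))) : Prop :=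
  2 ≤ theChoice.length ∧ ∀ kv ∈ boxes2, kv.2 ≠ []
instance (theChoice : List String) (boxes2 : List (String × List (List String))) : Decidable (Pre_bestChoiceSim theChoice boxes2) := by unfold Pre_bestChoiceSim; infer_instance
def pvWitness_bestChoiceSim : List String × (List (String × List (List String))) :=
  (["a", "b"], [("k", [["a"], ["c"]])])

def Spec_bestChoiceSim (theChoice : List String) (boxes2 : List (String × List (List String))) (out : String) : Prop := out = bestChoiceSim_alt theChoice boxes2
instance (theChoice : List String) (boxes2 : List (String × List (List String))) (out : String) : Decidable (Spec_bestChoiceSim theChoice boxes2 out) := by unfold Spec_bestChoiceSim; infer_instance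

-- ===== CLAIM (what is proved, stated in full; the proofs are below) =====
def Claim_equal_bestChoiceSim : Prop := ∀ (theChoice : List String) (boxes2 : List (String × List (List String))), Dom_bestChoiceSim theChoice boxes2 → Pre_bestChoiceSim theChoice boxes2 → Spec_bestChoiceSim theChoice boxes2 (bestChoiceSim theChoice boxes2)

-- ===== LEMMAS AND PROOFS =====

-- the per-candidate counting loop is a countP ('sum(1 for … if …)')
lemma hits_eq (tC : List String) (bs : List (String × List (List String))) (i : Nat) :
    hits tC bs i =
      (bs.countP (fun kv =>
        (box0 kv.2).contains (getS tC (i : Int)) && !(anyEarlier tC (box0 kv.2) i)) : Int) := by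
  unfold hits
  rw [PySem.List.foldl_if_add_one]
  ring

lemma hits_cons (tC : List String) (kv : String × List (List String))
    (bs : List (String × List (List String))) (i : Nat) :
    hits tC (kv :: bs) i =
      (if (box0 kv.2).contains (getS tC (i : Int)) && !(anyEarlier tC (box0 kv.2) i)
       then 1 else 0) + hits tC bs i := by
  simp only [hits_eq, List.countP_cons]
  push_cast
  split_ifs <;> ring

lemma anyE0 (tC box : List String) : anyEarlier tC box 0 = false := by simp [anyEarlier]
lemma anyE1 (tC box : List String) :
    anyEarlier tC box 1 = box.contains (getS tC 0) := by
  simp [anyEarlier, List.range_succ]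
lemma anyE2 (tC box : List String) :
    anyEarlier tC box 2 = (box.contains (getS tC 0) || box.contains (getS tC 1)) := by
  simp [anyEarlier, List.range_succ]
lemma anyE3 (tC box : List String) :
    anyEarlier tC box 3 = (box.contains (getS tC 0) || box.contains (getS tC 1) || box.contains (getS tC 2)) := by
  simp [anyEarlier, List.range_succ, Bool.or_assoc]

lemma fold4 (tC : List String) (bs : List (String × List (List String))) :
    ∀ a b c d : Int,
      bs.foldl (stepA4 tC) (a, b, c, d) =
        (a + hits tC bs 0, b + hits tC bs 1, c + hits tC bs 2, d + hits tC bs 3) := by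
  induction bs with
  | nil => intro a b c d; simp [hits]
  | cons kv bs ih =>
      intro a b c d
      simp only [List.foldl_cons, stepA4]
      rw [hits_cons, hits_cons, hits_cons, hits_cons, anyE0, anyE1, anyE2, anyE3]
      split_ifs with h0 h1 h2 h3 <;> rw [ih] <;> simp_all <;> omega

lemma fold3 (tC : List String) (bs : List (String × List (List String))) :
    ∀ a b c : Int,
      bs.foldl (stepA3 tC) (a, b, c) =
        (a + hits tC bs 0, b + hits tC bs 1, c + hits tC bs 2) := by
  induction bs with
  | nil => intro a b c; simp [hits]
  | cons kv bs ih =>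
      intro a b c
      simp only [List.foldl_cons, stepA3]
      rw [hits_cons, hits_cons, hits_cons, anyE0, anyE1, anyE2]
      split_ifs with h0 h1 h2 <;> rw [ih] <;> simp_all <;> omega

lemma fold2 (tC : List String) (bs : List (String × List (List String))) :
    ∀ a b : Int,
      bs.foldl (stepA2 tC) (a, b) = (a + hits tC bs 0, b + hits tC bs 1) := by
  induction bs with
  | nil => intro a b; simp [hits]
  | cons kv bs ih =>
      intro a b
      simp only [List.foldl_cons, stepA2]
      rw [hits_cons, hits_cons, anyE0, anyE1]
      split_ifs with h0 h1 <;> rw [ih] <;> simp_all <;> omega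

-- min(range(n), key=f) picks the first index of minimal key: matches A's elif-on-min chain
lemma minsel4 (f : Nat → Int) :
    (PySem.List.min? [0, 1, 2, 3] f).getD 0 =
      (if min (min (min (f 0) (f 1)) (f 2)) (f 3) = f 0 then 0
       else if min (min (min (f 0) (f 1)) (f 2)) (f 3) = f 1 then 1
       else if min (min (min (f 0) (f 1)) (f 2)) (f 3) = f 2 then 2
       else 3) := by
  simp only [PySem.List.min?, List.foldl]
  by_cases h1 : f 1 < f 0 <;>
    [simp only [if_pos h1]; simp only [if_neg h1]] <;>
    [by_cases h2 : f 2 < f 1; by_cases h2 : f 2 < f 0] <;>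
    first
      | (simp only [if_pos h2] <;>
          by_cases h3 : f 3 < f 2 <;>
          [simp only [if_pos h3]; simp only [if_neg h3]] <;>
          simp only [Option.getD_some] <;> split_ifs <;> omega)
      | (simp only [if_neg h2] <;>
          (first
            | (by_cases h3 : f 3 < f 1 <;>
               [simp only [if_pos h3]; simp only [if_neg h3]] <;>
               simp only [Option.getD_some] <;> split_ifs <;> omega)
            | (by_cases h3 : f 3 < f 0 <;>
               [simp only [if_pos h3]; simp only [if_neg h3]] <;>
               simp only [Option.getD_some] <;> split_ifs <;> omega)))

lemma minsel3 (f : Nat → Int) :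
    (PySem.List.min? [0, 1, 2] f).getD 0 =
      (if min (min (f 0) (f 1)) (f 2) = f 0 then 0
       else if min (min (f 0) (f 1)) (f 2) = f 1 then 1
       else 2) := by
  simp only [PySem.List.min?, List.foldl]
  by_cases h1 : f 1 < f 0 <;>
    [simp only [if_pos h1]; simp only [if_neg h1]] <;>
    [by_cases h2 : f 2 < f 1; by_cases h2 : f 2 < f 0] <;>
    [simp only [if_pos h2]; simp only [if_neg h2]; simp only [if_pos h2]; simp only [if_neg h2]] <;>
    simp only [Option.getD_some] <;> split_ifs <;> omega

lemma minsel2 (f : Nat → Int) :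
    (PySem.List.min? [0, 1] f).getD 0 =
      (if min (f 0) (f 1) = f 0 then 0 else 1) := by
  simp only [PySem.List.min?, List.foldl]
  by_cases h1 : f 1 < f 0 <;>
    [simp only [if_pos h1]; simp only [if_neg h1]] <;>
    simp only [Option.getD_some] <;> split_ifs <;> omega

-- ===== VERDICT (by name: the statement is the Claim_ definition above) =====
theorem bestChoiceSim_spec : Claim_equal_bestChoiceSim := by
  intro tC bs _ _
  unfold Spec_bestChoiceSim bestChoiceSim bestChoiceSim_alt
  by_cases h4 : tC.length = 4
  · simp only [if_pos h4]
    rw [show List.range 4 = [0, 1, 2, 3] from rfl, minsel4, fold4]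
    simp only [zero_add]
    split_ifs <;> rfl
  · by_cases h3 : tC.length = 3
    · simp only [if_neg h4, if_pos h3]
      rw [show List.range 3 = [0, 1, 2] from rfl, minsel3, fold3]
      simp only [zero_add]
      split_ifs <;> rfl
    · simp only [if_neg h4, if_neg h3]
      rw [show List.range 2 = [0, 1] from rfl, minsel2, fold2]
      simp only [zero_add]
      split_ifs <;> rfl
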